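-- pv_equiv track=rewrite | github.com/Rafael-2109/frete-sistema | app/bi/models.py | get_regiao_by_uf
-- ===== SOURCE A (Python) =====
-- def get_regiao_by_uf(uf):
--     """Retorna a região baseada na UF"""
--     regioes = {
--         'Norte': ['AC', 'AP', 'AM', 'PA', 'RO', 'RR', 'TO'],
--         'Nordeste': ['AL', 'BA', 'CE', 'MA', 'PB', 'PE', 'PI', 'RN', 'SE'],
--         'Centro-Oeste': ['DF', 'GO', 'MT', 'MS'],
--         'Sudeste': ['ES', 'MG', 'RJ', 'SP'],
--         'Sul': ['PR', 'RS', 'SC']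
--     }
--
--     for regiao, estados in regioes.items():
--         if uf in estados:
--             return regiao
--     return 'Indefinido'
-- ===== SOURCE B (Python) =====
-- _UF_TO_REGIAO = {
--     'AC': 'Norte', 'AP': 'Norte', 'AM': 'Norte', 'PA': 'Norte',
--     'RO': 'Norte', 'RR': 'Norte', 'TO': 'Norte',
--     'AL': 'Nordeste', 'BA': 'Nordeste', 'CE': 'Nordeste', 'MA': 'Nordeste',
--     'PB': 'Nordeste', 'PE': 'Nordeste', 'PI': 'Nordeste', 'RN': 'Nordeste',
--     'SE': 'Nordeste',
--     'DF': 'Centro-Oeste', 'GO': 'Centro-Oeste', 'MT': 'Centro-Oeste', 'MS': 'Centro-Oeste',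
--     'ES': 'Sudeste', 'MG': 'Sudeste', 'RJ': 'Sudeste', 'SP': 'Sudeste',
--     'PR': 'Sul', 'RS': 'Sul', 'SC': 'Sul',
-- }
--
-- def get_regiao_by_uf(uf):
--     """Retorna a região baseada na UF"""
--     return _UF_TO_REGIAO.get(uf, 'Indefinido')
-- ===== Notes on version B (the rewrite author's own statement) =====
-- stated objective: simpler
-- what changed: B replaces A's per-call loop over the region->states table with a single flat state->region literal dict built once at module level and one direct .get lookup with the 'Indefinido' default; no loop over regions and no per-list membership scan remain.
import Mathlib
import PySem

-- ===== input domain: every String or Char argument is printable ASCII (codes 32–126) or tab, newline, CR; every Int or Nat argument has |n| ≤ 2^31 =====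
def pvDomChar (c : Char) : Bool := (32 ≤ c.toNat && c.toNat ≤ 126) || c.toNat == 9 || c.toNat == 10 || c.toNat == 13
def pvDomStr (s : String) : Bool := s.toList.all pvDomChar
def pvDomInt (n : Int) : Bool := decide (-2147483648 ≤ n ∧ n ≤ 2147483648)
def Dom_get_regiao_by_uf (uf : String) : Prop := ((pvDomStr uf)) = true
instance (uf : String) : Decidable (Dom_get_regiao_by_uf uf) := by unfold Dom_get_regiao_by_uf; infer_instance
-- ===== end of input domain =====

-- B replaces A's per-call scan over the region->states table by one lookup in a flat
-- state->region literal dict with the 'Indefinido' default (objective: simpler).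

-- ===== PORT A =====
-- the region -> states dict literal of A, iterated in insertion order
def pvRegioes : List (String × List String) :=
  [("Norte", ["AC", "AP", "AM", "PA", "RO", "RR", "TO"]),
   ("Nordeste", ["AL", "BA", "CE", "MA", "PB", "PE", "PI", "RN", "SE"]),
   ("Centro-Oeste", ["DF", "GO", "MT", "MS"]),
   ("Sudeste", ["ES", "MG", "RJ", "SP"]),
   ("Sul", ["PR", "RS", "SC"])]

-- 'for regiao, estados in regioes.items(): if uf in estados: return regiao' / 'return "Indefinido"'
def pvLoopA (uf : String) : List (String × List String) → String
  | [] => "Indefinido"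
  | (regiao, estados) :: rest => if estados.contains uf then regiao else pvLoopA uf rest

def get_regiao_by_uf (uf : String) : String :=
  pvLoopA uf pvRegioes

-- ===== PORT B =====
-- the module-level flat literal dict _UF_TO_REGIAO of Source B (27 distinct keys, insertion order)
def pvUfToRegiao : PySem.Dict String String := PySem.Dict.ofList
  [("AC", "Norte"), ("AP", "Norte"), ("AM", "Norte"), ("PA", "Norte"),
   ("RO", "Norte"), ("RR", "Norte"), ("TO", "Norte"),
   ("AL", "Nordeste"), ("BA", "Nordeste"), ("CE", "Nordeste"), ("MA", "Nordeste"),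
   ("PB", "Nordeste"), ("PE", "Nordeste"), ("PI", "Nordeste"), ("RN", "Nordeste"),
   ("SE", "Nordeste"),
   ("DF", "Centro-Oeste"), ("GO", "Centro-Oeste"), ("MT", "Centro-Oeste"), ("MS", "Centro-Oeste"),
   ("ES", "Sudeste"), ("MG", "Sudeste"), ("RJ", "Sudeste"), ("SP", "Sudeste"),
   ("PR", "Sul"), ("RS", "Sul"), ("SC", "Sul")]

-- return _UF_TO_REGIAO.get(uf, 'Indefinido')
def get_regiao_by_uf_alt (uf : String) : String :=
  pvUfToRegiao.getD uf "Indefinido"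

-- ===== PRECONDITION & SPEC =====
def Spec_get_regiao_by_uf (uf : String) (out : String) : Prop := out = get_regiao_by_uf_alt uf
instance (uf : String) (out : String) : Decidable (Spec_get_regiao_by_uf uf out) := by unfold Spec_get_regiao_by_uf; infer_instance

-- ===== CLAIM (what is proved, stated in full; the proofs are below) =====
def Claim_equal_get_regiao_by_uf : Prop := ∀ (uf : String), Dom_get_regiao_by_uf uf → Spec_get_regiao_by_uf uf (get_regiao_by_uf uf)

-- ===== LEMMAS AND PROOFS =====

-- first match in one region's flattened segment
theorem pvSeg_eq (uf r : String) (es : List String) (tail : List (String × String)) :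
    (PySem.Dict.mk (es.map (fun e => (e, r)) ++ tail)).getD uf "Indefinido"
      = if es.contains uf then r else (PySem.Dict.mk tail).getD uf "Indefinido" := by
  induction es with
  | nil => simp
  | cons e es ih =>
    simp only [List.map_cons, List.cons_append, PySem.Dict.getD_eq_get?_getD,
      PySem.Dict.get?_mk_cons, List.contains_cons] at *
    by_cases h : e == uf
    · have : uf == e := by exact (beq_iff_eq).mpr ((beq_iff_eq).mp h).symm
      simp [h, this]
    · have : ¬ (uf == e) := by
        intro hc; exact h ((beq_iff_eq).mpr ((beq_iff_eq).mp hc).symm)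
      simp [h, this, ih]

-- A's scan over the regions equals the first-match lookup in the flattened pair list
theorem pvLoop_eq (uf : String) (L : List (String × List String)) :
    pvLoopA uf L
      = (PySem.Dict.mk (L.flatMap (fun p => p.2.map (fun estado => (estado, p.1))))).getD uf "Indefinido" := by
  induction L with
  | nil => simp [pvLoopA, PySem.Dict.getD_eq_get?_getD, PySem.Dict.get?]
  | cons p rest ih =>
    obtain ⟨r, es⟩ := p
    simp only [pvLoopA, List.flatMap_cons, pvSeg_eq, ih]

-- B's flat literal dict is exactly A's table flattened (both closed terms; checked by the kernel)
theorem pvFlat_eq :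
    pvUfToRegiao = PySem.Dict.mk (pvRegioes.flatMap (fun p => p.2.map (fun estado => (estado, p.1)))) := by
  decide

-- ===== VERDICT (by name: the statement is the Claim_ definition above) =====
theorem get_regiao_by_uf_spec : Claim_equal_get_regiao_by_uf := by
  intro uf _
  show get_regiao_by_uf uf = get_regiao_by_uf_alt uf
  rw [get_regiao_by_uf, get_regiao_by_uf_alt, pvFlat_eq, pvLoop_eq]
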